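-- pv_equiv track=rewrite | github.com/magnusmuru/hackerrank-UVA-kattis-solutions | HACKERRANK/Cutting boards/CuttingBoards.py | boardCutting
-- ===== SOURCE A (Python) =====
-- def boardCutting(cost_y, cost_x):
--     row = 1
--     column = 1
--
--     length_cuts = sorted(cost_y, reverse=True)
--     width_cuts = sorted(cost_x, reverse=True)
--
--     output = 0
--     for _ in range(len(cost_y) + len(cost_x)):
--
--         if (length_cuts != [] and width_cuts != [] and length_cuts[0] >= width_cuts[0]) or (
--                 width_cuts == [] and length_cuts != []):
--             output += row * length_cuts[0]
--             column += 1
--             length_cuts.remove(length_cuts[0])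
--
--         elif (width_cuts != []) or (length_cuts == [] and width_cuts != []):
--             output += column * width_cuts[0]
--             row += 1
--             width_cuts.remove(width_cuts[0])
--     return output % (pow(10, 9) + 7)
-- ===== SOURCE B (Python) =====
-- def boardCutting(cost_y, cost_x):
--     L = sorted(cost_y, reverse=True)
--     W = sorted(cost_x, reverse=True)
--     i = j = 0
--     rows = 1
--     cols = 1
--     total = 0
--     while i < len(L) and j < len(W):
--         if L[i] >= W[j]:
--             total += rows * L[i]
--             cols += 1
--             i += 1
--         else:
--             total += cols * W[j]
--             rows += 1
--             j += 1
--     total += rows * sum(L[i:]) + cols * sum(W[j:])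
--     return total % (10 ** 9 + 7)
-- ===== Notes on version B (the rewrite author's own statement) =====
-- stated objective: faster
-- what changed: Replaces the O(n) list.remove(front) inside the merge loop by two index pointers over the two sorted lists, and folds the leftover tail into a single sum instead of continuing the loop.
import Mathlib
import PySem

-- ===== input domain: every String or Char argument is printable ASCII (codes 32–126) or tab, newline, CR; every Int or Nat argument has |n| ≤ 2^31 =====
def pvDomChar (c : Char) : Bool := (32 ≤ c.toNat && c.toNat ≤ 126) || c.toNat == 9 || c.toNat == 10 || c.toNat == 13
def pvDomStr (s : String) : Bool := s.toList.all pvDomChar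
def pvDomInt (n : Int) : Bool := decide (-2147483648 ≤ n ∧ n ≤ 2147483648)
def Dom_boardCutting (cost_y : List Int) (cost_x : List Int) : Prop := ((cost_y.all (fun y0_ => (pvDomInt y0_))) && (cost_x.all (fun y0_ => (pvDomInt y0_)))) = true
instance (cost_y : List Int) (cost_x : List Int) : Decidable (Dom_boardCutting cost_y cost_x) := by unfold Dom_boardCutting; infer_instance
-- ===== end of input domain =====

-- B replaces A's quadratic remove-the-front merge by two index pointers over the sorted lists
-- plus one multiplied sum for the leftover tail (objective: faster, asymptotic).

-- ===== PORT A =====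
-- A's loop: len(cost_y)+len(cost_x) iterations over the mutable state
-- (row, column, length_cuts, width_cuts, output); list.remove(l[0]) ported via PySem.List.remove?.
def pvALoop : Nat → Int → Int → List Int → List Int → Int → Int
  | 0, _, _, _, _, output => output
  | n + 1, row, column, l, w, output =>
    if (l ≠ [] ∧ w ≠ [] ∧ l.headD 0 ≥ w.headD 0) ∨ (w = [] ∧ l ≠ []) then
      pvALoop n row (column + 1) ((PySem.List.remove? l (l.headD 0)).getD l) w (output + row * l.headD 0)
    else if (w ≠ []) ∨ (l = [] ∧ w ≠ []) then
      pvALoop n (row + 1) column l ((PySem.List.remove? w (w.headD 0)).getD w) (output + column * w.headD 0)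
    else
      pvALoop n row column l w output

def boardCutting (cost_y : List Int) (cost_x : List Int) : Int :=
  let length_cuts := PySem.List.sorted cost_y (fun v => v) true
  let width_cuts := PySem.List.sorted cost_x (fun v => v) true
  PySem.Int.mod (pvALoop (cost_y.length + cost_x.length) 1 1 length_cuts width_cuts 0) (10 ^ 9 + 7)

-- ===== PORT B =====
-- B's merge: two pointers over the two sorted lists, modelled structurally; once one side
-- is exhausted the remaining tail is added as a single multiplied sum (Source B's `sum(L[i:])`).
def pvBMerge : List Int → List Int → Int → Int → Int → Int
  | a :: l, b :: w, rows, cols, total =>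
    if a ≥ b then pvBMerge l (b :: w) rows (cols + 1) (total + rows * a)
    else pvBMerge (a :: l) w (rows + 1) cols (total + cols * b)
  | l, w, rows, cols, total => total + rows * l.sum + cols * w.sum

def boardCutting_alt (cost_y : List Int) (cost_x : List Int) : Int :=
  let L := PySem.List.sorted cost_y (fun v => v) true
  let W := PySem.List.sorted cost_x (fun v => v) true
  PySem.Int.mod (pvBMerge L W 1 1 0) (10 ^ 9 + 7)

-- ===== PRECONDITION & SPEC =====
def Spec_boardCutting (cost_y : List Int) (cost_x : List Int) (out : Int) : Prop := out = boardCutting_alt cost_y cost_x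
instance (cost_y : List Int) (cost_x : List Int) (out : Int) : Decidable (Spec_boardCutting cost_y cost_x out) := by unfold Spec_boardCutting; infer_instance

-- ===== CLAIM (what is proved, stated in full; the proofs are below) =====
def Claim_equal_boardCutting : Prop := ∀ (cost_y : List Int) (cost_x : List Int), Dom_boardCutting cost_y cost_x → Spec_boardCutting cost_y cost_x (boardCutting cost_y cost_x)

-- ===== LEMMAS AND PROOFS =====

theorem pvLoop_eq_merge : ∀ (n : Nat) (l w : List Int) (row col out : Int),
    n = l.length + w.length → pvALoop n row col l w out = pvBMerge l w row col out := by
  intro n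
  induction n with
  | zero =>
    intro l w row col out h
    have hl : l = [] := by cases l with | nil => rfl | cons a t => simp at h; try omega
    have hw : w = [] := by cases w with | nil => rfl | cons a t => simp at h; try omega
    subst hl; subst hw
    simp [pvALoop, pvBMerge]
  | succ n ih =>
    intro l w row col out h
    cases l with
    | nil =>
      cases w with
      | nil => simp at h
      | cons b w' =>
        simp only [pvALoop, List.headD_cons]
        rw [if_neg (by simp), if_pos (by simp)]
        simp only [PySem.List.remove?_cons_self, Option.getD_some]
        rw [ih _ _ _ _ _ (by simpa using h)]
        simp [pvBMerge]; ring
    | cons a l' =>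
      cases w with
      | nil =>
        simp only [pvALoop, List.headD_cons]
        rw [if_pos (by simp)]
        simp only [PySem.List.remove?_cons_self, Option.getD_some]
        rw [ih _ _ _ _ _ (by simpa using h)]
        simp [pvBMerge]; ring
      | cons b w' =>
        by_cases hab : a ≥ b
        · simp only [pvALoop, List.headD_cons]
          rw [if_pos (by simp [hab])]
          simp only [PySem.List.remove?_cons_self, Option.getD_some]
          rw [ih _ _ _ _ _ (by simp at h ⊢; omega)]
          rw [show pvBMerge (a :: l') (b :: w') row col out
              = pvBMerge l' (b :: w') row (col + 1) (out + row * a) from by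
            simp [pvBMerge, hab]]
        · simp only [pvALoop, List.headD_cons]
          rw [if_neg (by simp [hab]), if_pos (by simp)]
          simp only [PySem.List.remove?_cons_self, Option.getD_some]
          rw [ih _ _ _ _ _ (by simp at h ⊢; omega)]
          rw [show pvBMerge (a :: l') (b :: w') row col out
              = pvBMerge (a :: l') w' (row + 1) col (out + col * b) from by
            simp [pvBMerge, hab]]

theorem ports_agree (cost_y cost_x : List Int) :
    boardCutting cost_y cost_x = boardCutting_alt cost_y cost_x := by
  show PySem.Int.mod (pvALoop (cost_y.length + cost_x.length) 1 1
      (PySem.List.sorted cost_y (fun v => v) true) (PySem.List.sorted cost_x (fun v => v) true) 0)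
      (10 ^ 9 + 7)
    = PySem.Int.mod (pvBMerge (PySem.List.sorted cost_y (fun v => v) true)
      (PySem.List.sorted cost_x (fun v => v) true) 1 1 0) (10 ^ 9 + 7)
  rw [pvLoop_eq_merge _ _ _ _ _ _ (by simp [PySem.List.length_sorted])]

-- ===== VERDICT (by name: the statement is the Claim_ definition above) =====
theorem boardCutting_spec : Claim_equal_boardCutting := by
  intro cost_y cost_x _
  unfold Spec_boardCutting
  exact ports_agree cost_y cost_x
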